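-- pv_equiv track=rewrite | github.com/Tiagosvi/Introduccion-a-la-programacion-I | Guia-7-IP/Guia7.py | banco
-- ===== SOURCE A (Python) =====
-- def banco (s: list[tuple]) -> int:
--     i:int = 0
--     plata: int = 0
--     while i < len (s):
--         if s[i][0] == 'R':
--             plata -= s[i][1]
--
--         if s[i][0] == 'I':
--             plata += s[i][1]
--
--         i+=1
--     return plata
-- ===== SOURCE B (Python) =====
-- def banco(s: list[tuple]) -> int:
--     deposits = sum(amt for tag, amt in s if tag == 'I')
--     withdrawals = sum(amt for tag, amt in s if tag == 'R')
--     return deposits - withdrawals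
-- ===== Notes on version B (the rewrite author's own statement) =====
-- stated objective: simpler
-- what changed: Replaced the single index-driven while loop with an interleaved accumulator by two independent filtered sums (deposits and withdrawals) whose difference is returned.
import Mathlib
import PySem

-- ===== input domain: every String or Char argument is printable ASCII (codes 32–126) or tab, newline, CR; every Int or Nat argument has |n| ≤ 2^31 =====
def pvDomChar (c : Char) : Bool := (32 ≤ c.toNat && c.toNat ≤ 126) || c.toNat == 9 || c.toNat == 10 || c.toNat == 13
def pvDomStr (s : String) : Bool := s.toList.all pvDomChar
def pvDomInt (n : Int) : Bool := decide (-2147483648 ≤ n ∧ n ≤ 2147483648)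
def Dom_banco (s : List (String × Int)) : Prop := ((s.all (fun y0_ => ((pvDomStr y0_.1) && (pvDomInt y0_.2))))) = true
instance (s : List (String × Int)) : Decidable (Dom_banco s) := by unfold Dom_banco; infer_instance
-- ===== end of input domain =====

-- ===== PORT A =====
def banco (s : List (String × Int)) : Int :=
  -- while i < len(s): conditional subtract on 'R', add on 'I'
  s.foldl (fun plata p =>
    let plata := if p.1 == "R" then plata - p.2 else plata
    if p.1 == "I" then plata + p.2 else plata) 0

-- ===== PORT B =====
-- B: two independent filtered sums, deposits minus withdrawals
def banco_alt (s : List (String × Int)) : Int :=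
  ((s.filter (fun p => p.1 == "I")).map Prod.snd).sum
    - ((s.filter (fun p => p.1 == "R")).map Prod.snd).sum

-- ===== PRECONDITION & SPEC =====
def Spec_banco (s : List (String × Int)) (out : Int) : Prop := out = banco_alt s
instance (s : List (String × Int)) (out : Int) : Decidable (Spec_banco s out) := by unfold Spec_banco; infer_instance

-- ===== CLAIM (what is proved, stated in full; the proofs are below) =====
def Claim_equal_banco : Prop := ∀ (s : List (String × Int)), Dom_banco s → Spec_banco s (banco s)

-- ===== LEMMAS AND PROOFS =====

-- ===== VERDICT (by name: the statement is the Claim_ definition above) =====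
theorem banco_aux (s : List (String × Int)) (acc : Int) :
    s.foldl (fun plata p =>
      let plata := if p.1 == "R" then plata - p.2 else plata
      if p.1 == "I" then plata + p.2 else plata) acc
      = acc + banco_alt s := by
  induction s generalizing acc with
  | nil => simp [banco_alt]
  | cons h t ih =>
    simp only [List.foldl_cons, ih, banco_alt, List.filter_cons]
    by_cases hR : h.1 == "R" <;> by_cases hI : h.1 == "I" <;>
      simp_all <;> ring

theorem banco_spec : Claim_equal_banco := by
  intro s _
  show banco s = banco_alt s
  simpa [banco] using banco_aux s 0
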